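-- pv_equiv track=rewrite | github.com/iamdlfl/Populator | packages/helpers/manipulators.py | sort_titles
-- ===== SOURCE A (Python) =====
-- def sort_titles(titles: list) -> tuple:
--     """
--     Processes a list of titles and returns a sorted tuple.
--
--     Since Python will replace "substrings" of our titles this sorts the list so that
--     the longer strings are replaced first and shorter strings are replaced last. It does so
--     by counting how many times a given string appears in the other strings of the list.
--
--     Example: In the PopuList example, "_PARTY_NAME" would replace the "_PARTY_NAME_ENGLISH"
--     substring of "_PARTY_NAME." So for Sinn Fein, this would result in "Sinn Fein_ENGLISH."
--     Since "_PARTY_NAME" appears in 3 total list items (itself, "_PARTY_NAME_ENGLISH" and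
--     "_PARTY_NAME_SHORT"), it will be sorted last.
--     """
--     new_list = []
--     title_tuple = tuple(titles)
--     for title in titles:
--         counter = 0
--         for word in title_tuple:
--             if title in word:
--                 counter += 1
--         new_list.append((title, counter))
--     sorted_titles = sorted(new_list, key=lambda title: title[1])
--     titles_tuple = tuple([title[0] for title in sorted_titles])
--     return titles_tuple
-- ===== SOURCE B (Python) =====
-- def sort_titles(titles: list) -> tuple:
--     """Count distinct titles once (a multiplicity dict), compute each distinct
--     title's containment count against distinct titles only, then bucket the
--     titles by count (a stable counting sort) instead of a comparison sort."""
--     mult = {}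
--     for w in titles:
--         mult[w] = mult.get(w, 0) + 1
--     count = {}
--     for t in mult:
--         count[t] = sum(m for w, m in mult.items() if t in w)
--     n = len(titles)
--     buckets = [[] for _ in range(n + 1)]
--     for t in titles:
--         buckets[count[t]].append(t)
--     return tuple(x for b in buckets for x in b)
-- ===== Notes on version B (the rewrite author's own statement) =====
-- stated objective: alternative
-- what changed: B first builds a multiplicity dict of distinct titles, computes each distinct title's containment count once against the distinct titles (weighted by multiplicity), and then orders the titles by a stable counting sort into count-indexed buckets instead of A's decorate-with-count pass followed by a comparison sort.
import Mathlib
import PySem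

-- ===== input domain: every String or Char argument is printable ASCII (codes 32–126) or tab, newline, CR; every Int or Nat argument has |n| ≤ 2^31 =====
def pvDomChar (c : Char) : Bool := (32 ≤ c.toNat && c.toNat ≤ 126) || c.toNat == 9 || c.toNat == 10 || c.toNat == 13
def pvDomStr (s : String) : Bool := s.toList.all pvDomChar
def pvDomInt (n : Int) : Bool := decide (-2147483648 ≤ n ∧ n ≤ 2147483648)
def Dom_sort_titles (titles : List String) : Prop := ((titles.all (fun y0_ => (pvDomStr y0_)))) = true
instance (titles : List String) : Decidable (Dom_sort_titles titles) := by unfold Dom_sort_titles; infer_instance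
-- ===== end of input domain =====

-- B replaces A's all-pairs count + comparison sort by a multiplicity dict over distinct titles plus a stable counting sort into count-indexed buckets; alternative decomposition, same result.


-- ===== PORT A =====
def sort_titles (titles : List String) : List String :=
  let new_list : List (String × Int) :=
    titles.foldl (fun nl title =>
      nl ++ [(title, titles.foldl (fun counter word =>
        if PySem.Str.isIn title word then counter + 1 else counter) (0 : Int))]) []
  let sorted_titles := PySem.List.sorted new_list (fun p => p.2) false
  sorted_titles.map (fun p => p.1)

-- ===== PORT B =====
-- mult[w] = mult.get(w, 0) + 1 over titles
def sort_titles_alt_mult (titles : List String) : PySem.Dict String Int :=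
  titles.foldl (fun d w => d.insert w (d.getD w 0 + 1)) PySem.Dict.empty

-- count[t] = sum(m for w, m in mult.items() if t in w), for each key t of mult
def sort_titles_alt_count (titles : List String) : PySem.Dict String Int :=
  let mult := sort_titles_alt_mult titles
  mult.keys.foldl (fun c t =>
    c.insert t (((mult.items.filter (fun p => PySem.Str.isIn t p.1)).map (fun p => p.2)).sum))
    PySem.Dict.empty

def sort_titles_alt (titles : List String) : List String :=
  let count := sort_titles_alt_count titles
  let n := titles.length
  -- buckets[count[t]].append(t); the index count[t] is an int ≥ 1, so plain Nat
  -- indexing via .toNat is exact here (no negative-index wraparound can occur)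
  let buckets := titles.foldl (fun bs t =>
    let k := (count.getD t 0).toNat
    bs.set k ((bs.getD k []) ++ [t])) (List.replicate (n + 1) ([] : List String))
  buckets.flatten

-- ===== PRECONDITION & SPEC =====
def Spec_sort_titles (titles : List String) (out : List String) : Prop := out = sort_titles_alt titles
instance (titles : List String) (out : List String) : Decidable (Spec_sort_titles titles out) := by unfold Spec_sort_titles; infer_instance

-- ===== CLAIM (what is proved, stated in full; the proofs are below) =====
def Claim_equal_sort_titles : Prop := ∀ (titles : List String), Dom_sort_titles titles → Spec_sort_titles titles (sort_titles titles)

-- ===== LEMMAS AND PROOFS =====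

-- the common key: how many titles contain t
def pvKey (titles : List String) (t : String) : Int :=
  (titles.countP (fun w => PySem.Str.isIn t w) : Int)

-- ---- Step A: A is the stable key-sort of titles by pvKey ----

-- insertBy commutes with decorating each element with its key
theorem pv_insertBy_map_decorate (k : String → Int) (x : String) :
    ∀ (acc : List String),
      PySem.List.insertBy (fun p q => decide (p.2 < q.2)) (x, k x)
          (acc.map (fun t => (t, k t)))
        = (PySem.List.insertBy (fun a b => decide (k a < k b)) x acc).map (fun t => (t, k t)) := by
  intro acc
  induction acc with
  | nil => simp [PySem.List.insertBy]
  | cons y ys ih =>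
    simp only [List.map_cons, PySem.List.insertBy]
    by_cases h : k x < k y
    · simp [h]
    · simp [h, ih]

theorem pv_foldl_ins_map (k : String → Int) :
    ∀ (ts acc : List String),
      ts.foldl (fun a x => PySem.List.insertBy (fun p q => decide (p.2 < q.2)) (x, k x) a)
          (acc.map (fun t => (t, k t)))
        = (ts.foldl (fun a x => PySem.List.insertBy (fun a b => decide (k a < k b)) x a) acc).map
            (fun t => (t, k t)) := by
  intro ts
  induction ts with
  | nil => intro acc; rfl
  | cons t ts ih =>
    intro acc
    simp only [List.foldl_cons]
    rw [pv_insertBy_map_decorate, ih]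

theorem pv_sorted_decorate (k : String → Int) (titles : List String) :
    (PySem.List.sorted (titles.map (fun t => (t, k t))) (fun p => p.2) false).map (fun p => p.1)
      = PySem.List.sorted titles k false := by
  rw [PySem.List.sorted_eq_foldl_insertBy, PySem.List.sorted_eq_foldl_insertBy, List.foldl_map]
  have h := pv_foldl_ins_map k titles []
  simp only [List.map_nil] at h
  rw [h, List.map_map]
  exact List.map_id' _

theorem pv_A_eq_key_sort (titles : List String) :
    sort_titles titles = PySem.List.sorted titles (pvKey titles) false := by
  unfold sort_titles
  rw [PySem.List.foldl_append_singleton_eq_map, List.nil_append]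
  have hmap : (titles.map (fun title =>
      (title, titles.foldl (fun counter word =>
        if PySem.Str.isIn title word then counter + 1 else counter) (0 : Int))))
      = titles.map (fun t => (t, pvKey titles t)) := by
    apply List.map_congr_left
    intro t _
    rw [PySem.List.foldl_if_add_one, pvKey, zero_add]
  rw [hmap, pv_sorted_decorate]

-- ---- Step B1: the count dict computes pvKey on every title ----

theorem pv_getD_foldl_insert (f : String → Int) (t : String) :
    ∀ (ks : List String) (d : PySem.Dict String Int),
      (ks.foldl (fun c k => c.insert k (f k)) d).getD t 0
        = if t ∈ ks then f t else d.getD t 0 := by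
  intro ks
  induction ks with
  | nil => intro d; simp
  | cons k ks ih =>
    intro d
    simp only [List.foldl_cons, ih, List.mem_cons, PySem.Dict.getD_insert]
    by_cases hk : t ∈ ks
    · simp [hk]
    · by_cases he : t = k <;> simp [hk, he]

theorem pv_sum_dedup_count (p : String → Bool) (titles : List String) :
    (((PySem.Set.ofList titles).filter p).map (fun k => ((titles.count k : Nat) : Int))).sum
      = ((titles.countP p : Nat) : Int) := by
  have hperm : ((PySem.Set.ofList titles).filter p).Perm (titles.dedup.filter p) := by
    apply (List.perm_ext_iff_of_nodup
      (List.Nodup.filter _ (PySem.Set.nodup_ofList titles))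
      (List.Nodup.filter _ titles.nodup_dedup)).mpr
    intro a
    simp [List.mem_filter, PySem.Set.mem_ofList, List.mem_dedup]
  rw [(hperm.map (fun k => ((titles.count k : Nat) : Int))).sum_eq,
    ← List.sum_map_count_dedup_filter_eq_countP p titles, Nat.cast_list_sum, List.map_map]
  rfl

theorem pv_count_getD (titles : List String) (t : String) (ht : t ∈ titles) :
    (sort_titles_alt_count titles).getD t 0 = pvKey titles t := by
  unfold sort_titles_alt_count
  have hmult : sort_titles_alt_mult titles = PySem.Dict.counter titles := by
    rw [sort_titles_alt_mult, PySem.Dict.foldl_insert_getD_add_one_eq_counter,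
      PySem.Dict.counter_eq_foldl]
  simp only [hmult]
  rw [pv_getD_foldl_insert]
  have htk : t ∈ (PySem.Dict.counter titles).keys := by
    rw [PySem.Dict.keys_counter, PySem.Set.mem_ofList]; exact ht
  rw [if_pos htk, PySem.Dict.items_counter]
  rw [List.filter_map, List.map_map]
  have hfilter : (PySem.Set.ofList titles).filter
      ((fun p : String × Int => PySem.Str.isIn t p.1) ∘ (fun k => (k, (titles.count k : Int))))
      = (PySem.Set.ofList titles).filter (fun w => PySem.Str.isIn t w) := by
    apply List.filter_congr; intro x _; rfl
  rw [hfilter]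
  have hmapeq : ((PySem.Set.ofList titles).filter (fun w => PySem.Str.isIn t w)).map
        ((fun p : String × Int => p.2) ∘ (fun k => (k, (titles.count k : Int))))
      = ((PySem.Set.ofList titles).filter (fun w => PySem.Str.isIn t w)).map
        (fun k => ((titles.count k : Nat) : Int)) := by
    apply List.map_congr_left; intro x _; rfl
  rw [hmapeq, pv_sum_dedup_count, pvKey]

-- ---- Step B2: the bucket fold builds the per-count filters ----

theorem pv_bucket_fold (k : String → Int) (n : Nat) :
    ∀ (xs ps : List String), (∀ t ∈ xs, 0 ≤ k t ∧ k t ≤ (n : Int)) →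
      xs.foldl (fun bs t => bs.set (k t).toNat ((bs.getD (k t).toNat []) ++ [t]))
          ((List.range (n + 1)).map (fun c : Nat => ps.filter (fun y => k y == (c : Int))))
        = (List.range (n + 1)).map (fun c : Nat => (ps ++ xs).filter (fun y => k y == (c : Int))) := by
  intro xs
  induction xs with
  | nil => intro ps _; simp
  | cons t xs ih =>
    intro ps hb
    obtain ⟨h0, hn⟩ := hb t (List.mem_cons_self)
    have hjn : (k t).toNat < n + 1 := by omega
    have hkt : ((k t).toNat : Int) = k t := Int.toNat_of_nonneg h0
    simp only [List.foldl_cons]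
    have hset : ((List.range (n + 1)).map (fun c : Nat => ps.filter (fun y => k y == (c : Int)))).set
          (k t).toNat
          ((((List.range (n + 1)).map (fun c : Nat => ps.filter (fun y => k y == (c : Int)))).getD (k t).toNat []) ++ [t])
        = (List.range (n + 1)).map (fun c : Nat => (ps ++ [t]).filter (fun y => k y == (c : Int))) := by
      have hget : (((List.range (n + 1)).map (fun c : Nat => ps.filter (fun y => k y == (c : Int)))).getD (k t).toNat [])
          = ps.filter (fun y => k y == (((k t).toNat : Nat) : Int)) := by
        rw [List.getD_eq_getElem?_getD, List.getElem?_map, List.getElem?_range hjn]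
        rfl
      apply List.ext_getElem
      · simp
      · intro i hi1 hi2
        simp only [List.length_set, List.length_map, List.length_range] at hi1
        rw [List.getElem_set]
        by_cases hij : (k t).toNat = i
        · rw [if_pos hij, hget, hij]
          simp only [List.getElem_map, List.getElem_range, List.filter_append]
          have : k t == ((i : Nat) : Int) := by
            rw [beq_iff_eq, ← hij, hkt]
          simp [this]
        · rw [if_neg hij]
          simp only [List.getElem_map, List.getElem_range, List.filter_append]
          have : ¬ (k t == ((i : Nat) : Int)) := by
            rw [beq_iff_eq]
            intro h
            apply hij
            omega
          simp [List.filter, this]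
    rw [hset, ih (ps ++ [t]) (fun t' ht' => hb t' (List.mem_cons_of_mem _ ht')), List.append_assoc]
    rfl

-- ---- Step C: stable insertion sort by an Int key is the bucket concatenation ----

theorem pv_insertBy_append_left {α : Type} (before : α → α → Bool) (x : α) :
    ∀ (l m : List α), (∀ y ∈ l, before x y = false) →
      PySem.List.insertBy before x (l ++ m) = l ++ PySem.List.insertBy before x m := by
  intro l
  induction l with
  | nil => intro m _; rfl
  | cons y ys ih =>
    intro m h
    have hy : before x y = false := h y (List.mem_cons_self)
    have hstep : PySem.List.insertBy before x (y :: (ys ++ m))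
        = y :: PySem.List.insertBy before x (ys ++ m) := by
      simp [PySem.List.insertBy, hy]
    rw [List.cons_append, hstep, ih m (fun z hz => h z (List.mem_cons_of_mem _ hz)), List.cons_append]

theorem pv_insertBy_front {α : Type} (before : α → α → Bool) (x : α) :
    ∀ (m : List α), (∀ y ∈ m, before x y = true) →
      PySem.List.insertBy before x m = x :: m := by
  intro m h
  cases m with
  | nil => rfl
  | cons z zs => simp [PySem.List.insertBy, h z (List.mem_cons_self)]

theorem pv_ins_flatMap {α : Type} (k : α → Int) (x : α) :
    ∀ (vs : List Int) (ys : List α), vs.Pairwise (· < ·) → k x ∈ vs →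
      PySem.List.insertBy (fun a b => decide (k a < k b)) x
          (vs.flatMap (fun c => ys.filter (fun y => k y == c)))
        = vs.flatMap (fun c => (ys ++ [x]).filter (fun y => k y == c)) := by
  intro vs
  induction vs with
  | nil => intro ys _ hx; exact absurd hx (List.not_mem_nil)
  | cons c vs ih =>
    intro ys hp hx
    have hpv : vs.Pairwise (· < ·) := (List.pairwise_cons.mp hp).2
    have hlt : ∀ v ∈ vs, c < v := (List.pairwise_cons.mp hp).1
    simp only [List.flatMap_cons]
    by_cases hc : k x = c
    · -- insert at the end of bucket c
      have hbucket : ∀ y ∈ ys.filter (fun y => k y == c), (decide (k x < k y)) = false := by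
        intro y hy
        have : k y = c := by simpa using (List.mem_filter.mp hy).2
        simp [this, hc]
      rw [pv_insertBy_append_left _ _ _ _ hbucket]
      have hrest : ∀ y ∈ vs.flatMap (fun c' => ys.filter (fun y => k y == c')),
          (decide (k x < k y)) = true := by
        intro y hy
        obtain ⟨c', hc', hyf⟩ := List.mem_flatMap.mp hy
        have : k y = c' := by simpa using (List.mem_filter.mp hyf).2
        simp [this, hc]
        exact hlt c' hc'
      rw [pv_insertBy_front _ _ _ hrest]
      have h1 : (ys ++ [x]).filter (fun y => k y == c) = ys.filter (fun y => k y == c) ++ [x] := by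
        rw [List.filter_append]
        simp [List.filter, hc]
      have h2 : vs.flatMap (fun c' => (ys ++ [x]).filter (fun y => k y == c'))
          = vs.flatMap (fun c' => ys.filter (fun y => k y == c')) := by
        rw [List.flatMap_def, List.flatMap_def]
        congr 1
        apply List.map_congr_left
        intro c' hc'
        rw [List.filter_append]
        have : ¬ (k x == c') := by
          have := hlt c' hc'
          rw [beq_iff_eq]; omega
        simp [List.filter, this]
      rw [h1, h2]
      simp
    · -- k x belongs to a later bucket
      have hxv : k x ∈ vs := by
        rcases List.mem_cons.mp hx with h | h
        · exact absurd h hc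
        · exact h
      have hcx : c < k x := hlt _ hxv
      have hbucket : ∀ y ∈ ys.filter (fun y => k y == c), (decide (k x < k y)) = false := by
        intro y hy
        have : k y = c := by simpa using (List.mem_filter.mp hy).2
        simp [this]; omega
      rw [pv_insertBy_append_left _ _ _ _ hbucket, ih ys hpv hxv]
      have h1 : (ys ++ [x]).filter (fun y => k y == c) = ys.filter (fun y => k y == c) := by
        rw [List.filter_append]
        have : ¬ (k x == c) := by rw [beq_iff_eq]; exact hc
        simp [List.filter, this]
      rw [h1]
  
theorem pv_sorted_eq_flatMap {α : Type} (k : α → Int) (vs : List Int)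
    (hp : vs.Pairwise (· < ·)) :
    ∀ (xs ys : List α), (∀ x ∈ xs, k x ∈ vs) →
      xs.foldl (fun acc x => PySem.List.insertBy (fun a b => decide (k a < k b)) x acc)
          (vs.flatMap (fun c => ys.filter (fun y => k y == c)))
        = vs.flatMap (fun c => (ys ++ xs).filter (fun y => k y == c)) := by
  intro xs
  induction xs with
  | nil => intro ys _; simp
  | cons x xs ih =>
    intro ys hm
    simp only [List.foldl_cons]
    rw [pv_ins_flatMap k x vs ys hp (hm x (List.mem_cons_self)),
      ih (ys ++ [x]) (fun x' hx' => hm x' (List.mem_cons_of_mem _ hx')), List.append_assoc]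
    rfl

theorem pv_sorted_buckets {α : Type} (k : α → Int) (vs : List Int)
    (hp : vs.Pairwise (· < ·)) (xs : List α) (hm : ∀ x ∈ xs, k x ∈ vs) :
    PySem.List.sorted xs k false = vs.flatMap (fun c => xs.filter (fun y => k y == c)) := by
  rw [PySem.List.sorted_eq_foldl_insertBy]
  have h0 : ([] : List α) = vs.flatMap (fun c => ([] : List α).filter (fun y => k y == c)) := by
    simp
  rw [h0, pv_sorted_eq_flatMap k vs hp xs [] hm]
  rfl

-- ===== VERDICT (by name: the statement is the Claim_ definition above) =====
theorem sort_titles_spec : Claim_equal_sort_titles := by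
  intro titles _
  show sort_titles titles = sort_titles_alt titles
  rw [pv_A_eq_key_sort]
  show PySem.List.sorted titles (pvKey titles) false
      = (titles.foldl (fun bs t =>
          bs.set ((sort_titles_alt_count titles).getD t 0).toNat
            ((bs.getD ((sort_titles_alt_count titles).getD t 0).toNat []) ++ [t]))
          (List.replicate (titles.length + 1) ([] : List String))).flatten
  have hkey : ∀ t ∈ titles, (sort_titles_alt_count titles).getD t 0 = pvKey titles t :=
    fun t ht => pv_count_getD titles t ht
  have hbound : ∀ t ∈ titles,
      0 ≤ (sort_titles_alt_count titles).getD t 0 ∧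
      (sort_titles_alt_count titles).getD t 0 ≤ (titles.length : Int) := by
    intro t ht
    rw [hkey t ht, pvKey]
    have := List.countP_le_length (p := fun w => PySem.Str.isIn t w) (l := titles)
    constructor
    · exact Int.natCast_nonneg _
    · exact_mod_cast this
  have hrepl : (List.range (titles.length + 1)).map
        (fun c : Nat => ([] : List String).filter
          (fun y => (sort_titles_alt_count titles).getD y 0 == (c : Int)))
      = List.replicate (titles.length + 1) ([] : List String) := by
    simp only [List.filter_nil, List.map_const', List.length_range]
  rw [← hrepl,
    pv_bucket_fold (fun t => (sort_titles_alt_count titles).getD t 0) titles.length titles [] hbound,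
    List.nil_append]
  have hmapf : (List.range (titles.length + 1)).map
        (fun c : Nat => titles.filter (fun y => (sort_titles_alt_count titles).getD y 0 == (c : Int)))
      = (List.range (titles.length + 1)).map
        (fun c : Nat => titles.filter (fun y => pvKey titles y == (c : Int))) := by
    apply List.map_congr_left
    intro c _
    exact List.filter_congr (fun y hy => by rw [hkey y hy])
  rw [hmapf]
  have hvsp : ((List.range (titles.length + 1)).map (fun c : Nat => (c : Int))).Pairwise (· < ·) := by
    apply List.Pairwise.map
    · intro a b hab
      exact_mod_cast hab
    · exact List.pairwise_lt_range
  have hmem : ∀ x ∈ titles,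
      pvKey titles x ∈ (List.range (titles.length + 1)).map (fun c : Nat => (c : Int)) := by
    intro x hx
    rw [List.mem_map]
    refine ⟨titles.countP (fun w => PySem.Str.isIn x w), ?_, rfl⟩
    rw [List.mem_range]
    have := List.countP_le_length (p := fun w => PySem.Str.isIn x w) (l := titles)
    omega
  rw [pv_sorted_buckets (pvKey titles) _ hvsp titles hmem, List.flatMap_def, List.map_map]
  rfl
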